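-- pv_equiv track=rewrite | github.com/capescuba/aipplynow | services/resumeSvc/app.py | extract_job_domain
-- ===== SOURCE A (Python) =====
-- TECH_DOMAINS = {
--     "frontend": {"frontend", "front-end", "ui", "ux", "react", "angular", "vue", "javascript", "typescript", "css", "html"},
--     "backend": {"backend", "back-end", "api", "server", "database", "python", "java", "node.js", "golang"},
--     "fullstack": {"fullstack", "full-stack", "full stack", "frontend", "backend"},
--     "devops": {"devops", "cloud", "aws", "azure", "kubernetes", "docker", "ci/cd"},
--     "data": {"data engineer", "data scientist", "machine learning", "ai", "analytics", "big data"},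
--     "security": {"security", "cybersecurity", "information security", "security engineer"}
-- }
--
-- def extract_job_domain(job_desc):
--     """Extract technical domain from job description."""
--     job_desc_lower = job_desc.lower()
--     domain_scores = {}
--
--     for domain, keywords in TECH_DOMAINS.items():
--         score = sum(1 for keyword in keywords if keyword in job_desc_lower)
--         domain_scores[domain] = score
--
--     # Return domain with highest score, or "fullstack" if no clear winner
--     max_score = max(domain_scores.values())
--     if max_score == 0:
--         return "fullstack"
--
--     top_domains = [domain for domain, score in domain_scores.items() if score == max_score]
--     return top_domains[0]
-- ===== SOURCE B (Python) =====
-- TECH_DOMAINS = {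
--     "frontend": {"frontend", "front-end", "ui", "ux", "react", "angular", "vue", "javascript", "typescript", "css", "html"},
--     "backend": {"backend", "back-end", "api", "server", "database", "python", "java", "node.js", "golang"},
--     "fullstack": {"fullstack", "full-stack", "full stack", "frontend", "backend"},
--     "devops": {"devops", "cloud", "aws", "azure", "kubernetes", "docker", "ci/cd"},
--     "data": {"data engineer", "data scientist", "machine learning", "ai", "analytics", "big data"},
--     "security": {"security", "cybersecurity", "information security", "security engineer"}
-- }
--
-- def extract_job_domain(job_desc):
--     """Extract technical domain from job description (single-pass argmax)."""
--     text = job_desc.lower()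
--     best_domain, best_score = "fullstack", 0
--     for domain, keywords in TECH_DOMAINS.items():
--         score = sum(1 for kw in keywords if kw in text)
--         if score > best_score:
--             best_domain, best_score = domain, score
--     return best_domain
-- ===== Notes on version B (the rewrite author's own statement) =====
-- stated objective: simpler
-- what changed: Replaces A's build-a-score-dict, then max over values, then a filter pass for the first top domain with a single fold over TECH_DOMAINS maintaining (best_domain, best_score) with strict-greater updates seeded at ('fullstack', 0), which subsumes both the zero-score fallback and the first-wins tie-break.
import Mathlib
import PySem

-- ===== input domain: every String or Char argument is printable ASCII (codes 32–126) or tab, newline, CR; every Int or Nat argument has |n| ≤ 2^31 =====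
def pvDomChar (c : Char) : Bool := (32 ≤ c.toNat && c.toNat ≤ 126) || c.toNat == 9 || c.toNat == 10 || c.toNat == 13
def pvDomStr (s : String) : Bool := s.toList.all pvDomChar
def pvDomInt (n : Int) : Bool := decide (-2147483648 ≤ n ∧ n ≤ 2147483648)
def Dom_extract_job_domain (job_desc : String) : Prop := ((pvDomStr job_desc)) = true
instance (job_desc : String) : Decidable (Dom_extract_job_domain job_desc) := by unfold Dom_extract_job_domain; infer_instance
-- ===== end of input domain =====

-- B replaces A's score-dict + max + filter passes with one fold keeping (best_domain, best_score); same cost, simpler.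

-- shared module-level constant TECH_DOMAINS (sets as distinct-element lists)
def pvTECH_DOMAINS : List (String × List String) :=
  [("frontend", ["frontend", "front-end", "ui", "ux", "react", "angular", "vue", "javascript", "typescript", "css", "html"]),
   ("backend", ["backend", "back-end", "api", "server", "database", "python", "java", "node.js", "golang"]),
   ("fullstack", ["fullstack", "full-stack", "full stack", "frontend", "backend"]),
   ("devops", ["devops", "cloud", "aws", "azure", "kubernetes", "docker", "ci/cd"]),
   ("data", ["data engineer", "data scientist", "machine learning", "ai", "analytics", "big data"]),
   ("security", ["security", "cybersecurity", "information security", "security engineer"])]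

-- ===== PORT A =====
-- sum(1 for keyword in keywords if keyword in job_desc_lower)
def pvScoreA (keywords : List String) (t : String) : Int :=
  keywords.foldl (fun acc k => if PySem.Str.isIn k t then acc + 1 else acc) 0

def extract_job_domain (job_desc : String) : String :=
  let job_desc_lower := PySem.Str.lower job_desc
  let domain_scores : PySem.Dict String Int :=
    pvTECH_DOMAINS.foldl (fun d p => d.insert p.1 (pvScoreA p.2 job_desc_lower)) PySem.Dict.empty
  -- max(domain_scores.values()) on a (literally) nonempty dict
  let max_score : Int := (PySem.List.max? domain_scores.values (fun x => x)).getD 0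
  if max_score = 0 then "fullstack"
  else
    let top_domains := (domain_scores.items.filter (fun p => p.2 == max_score)).map Prod.fst
    -- top_domains[0]; the list is provably nonempty
    top_domains.head?.getD ""

-- ===== PORT B =====
-- sum(1 for kw in keywords if kw in text) as a 0/1 count
def pvScoreB (keywords : List String) (t : String) : Int :=
  (keywords.countP (fun k => PySem.Str.isIn k t) : Int)

def extract_job_domain_alt (job_desc : String) : String :=
  let text := PySem.Str.lower job_desc
  let best :=
    pvTECH_DOMAINS.foldl
      (fun (b : String × Int) p =>
        let score := pvScoreB p.2 text
        if b.2 < score then (p.1, score) else b)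
      ("fullstack", 0)
  best.1

-- ===== PRECONDITION & SPEC =====
def Spec_extract_job_domain (job_desc : String) (out : String) : Prop := out = extract_job_domain_alt job_desc
instance (job_desc : String) (out : String) : Decidable (Spec_extract_job_domain job_desc out) := by unfold Spec_extract_job_domain; infer_instance

-- ===== CLAIM (what is proved, stated in full; the proofs are below) =====
def Claim_equal_extract_job_domain : Prop := ∀ (job_desc : String), Dom_extract_job_domain job_desc → Spec_extract_job_domain job_desc (extract_job_domain job_desc)

-- ===== LEMMAS AND PROOFS =====

lemma pvScore_eq (keywords : List String) (t : String) : pvScoreA keywords t = pvScoreB keywords t := by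
  unfold pvScoreA pvScoreB
  rw [PySem.List.foldl_if_add_one]
  simp

-- B's fold step, abstracted
def pvStep (b p : String × Int) : String × Int := if b.2 < p.2 then p else b

lemma pv_snd_fold (l : List (String × Int)) : ∀ b : String × Int,
    (l.foldl pvStep b).2 = l.foldl (fun m p => max m p.2) b.2 := by
  induction l with
  | nil => intro b; rfl
  | cons p t ih =>
    intro b
    simp only [List.foldl]
    rw [ih]
    congr 1
    unfold pvStep
    simp only [max_def]
    split_ifs <;> omega

lemma pv_le_snd_fold (l : List (String × Int)) : ∀ b : String × Int,
    b.2 ≤ (l.foldl pvStep b).2 := by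
  induction l with
  | nil => intro b; exact le_refl _
  | cons p t ih =>
    intro b
    simp only [List.foldl]
    refine le_trans ?_ (ih (pvStep b p))
    unfold pvStep
    split_ifs <;> omega

lemma pv_fold_no_update (l : List (String × Int)) : ∀ b : String × Int,
    (l.foldl pvStep b).2 ≤ b.2 → l.foldl pvStep b = b := by
  induction l with
  | nil => intro b _; rfl
  | cons p t ih =>
    intro b h
    simp only [List.foldl] at h ⊢
    by_cases hp : b.2 < p.2
    · exfalso
      have hle := pv_le_snd_fold t (pvStep b p)
      simp only [pvStep, if_pos hp] at h hle
      omega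
    · simp only [pvStep, if_neg hp] at h ⊢
      exact ih b h

lemma pv_fold_filter_head (l : List (String × Int)) : ∀ b : String × Int,
    b.2 < (l.foldl pvStep b).2 →
    (l.filter (fun p => p.2 == (l.foldl pvStep b).2)).head? = some (l.foldl pvStep b) := by
  induction l with
  | nil => intro b h; exact absurd h (lt_irrefl _)
  | cons p t ih =>
    intro b h
    simp only [List.foldl] at h ⊢
    by_cases hp : b.2 < p.2
    · simp only [pvStep, if_pos hp] at h ⊢
      by_cases h2 : p.2 < (t.foldl pvStep p).2
      · have hne : (p.2 == (t.foldl pvStep p).2) = false := by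
          simp; omega
        rw [List.filter_cons_of_neg (by simp [hne])]
        exact ih p h2
      · have heq : t.foldl pvStep p = p := pv_fold_no_update t p (by omega)
        rw [heq]
        rw [List.filter_cons_of_pos (by simp)]
        rfl
    · simp only [pvStep, if_neg hp] at h ⊢
      have hne : (p.2 == (t.foldl pvStep b).2) = false := by
        simp; omega
      rw [List.filter_cons_of_neg (by simp [hne])]
      exact ih b h

-- the two argmax shapes agree, abstracted over the six (nonnegative) scores
lemma pv_key (s1 s2 s3 s4 s5 s6 : Int) (h1 : 0 ≤ s1) :
    (let m : Int := [s2, s3, s4, s5, s6].foldl max s1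
     if m = 0 then "fullstack"
     else ((([("frontend", s1), ("backend", s2), ("fullstack", s3), ("devops", s4), ("data", s5), ("security", s6)].filter
         (fun p => p.2 == m)).map Prod.fst).head?).getD "")
    = ([("frontend", s1), ("backend", s2), ("fullstack", s3), ("devops", s4), ("data", s5), ("security", s6)].foldl
        pvStep ("fullstack", (0 : Int))).1 := by
  set l : List (String × Int) :=
    [("frontend", s1), ("backend", s2), ("fullstack", s3), ("devops", s4), ("data", s5), ("security", s6)] with hl
  have hm : [s2, s3, s4, s5, s6].foldl max s1 = (l.foldl pvStep ("fullstack", (0 : Int))).2 := by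
    rw [pv_snd_fold]
    simp only [hl, List.foldl]
    have : max 0 s1 = s1 := by omega
    rw [this]
  by_cases h0 : [s2, s3, s4, s5, s6].foldl max s1 = 0
  · simp only [h0]
    have hle : (l.foldl pvStep ("fullstack", (0 : Int))).2 ≤ 0 := by rw [← hm, h0]
    rw [pv_fold_no_update l _ hle]
    simp
  · simp only [if_neg h0]
    have hpos : (0 : Int) < (l.foldl pvStep ("fullstack", (0 : Int))).2 := by
      rw [← hm]
      have := (PySem.List.le_foldl_max [s2, s3, s4, s5, s6] s1).1
      omega
    have hf := pv_fold_filter_head l ("fullstack", (0 : Int)) hpos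
    rw [hm, List.head?_map, hf]
    simp

lemma pvScoreB_nonneg (keywords : List String) (t : String) : 0 ≤ pvScoreB keywords t := by
  unfold pvScoreB
  exact Int.natCast_nonneg _

-- ===== VERDICT (by name: the statement is the Claim_ definition above) =====
theorem extract_job_domain_spec : Claim_equal_extract_job_domain := by
  intro job_desc _
  have key := pv_key
    (pvScoreB ["frontend", "front-end", "ui", "ux", "react", "angular", "vue", "javascript", "typescript", "css", "html"] (PySem.Str.lower job_desc))
    (pvScoreB ["backend", "back-end", "api", "server", "database", "python", "java", "node.js", "golang"] (PySem.Str.lower job_desc))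
    (pvScoreB ["fullstack", "full-stack", "full stack", "frontend", "backend"] (PySem.Str.lower job_desc))
    (pvScoreB ["devops", "cloud", "aws", "azure", "kubernetes", "docker", "ci/cd"] (PySem.Str.lower job_desc))
    (pvScoreB ["data engineer", "data scientist", "machine learning", "ai", "analytics", "big data"] (PySem.Str.lower job_desc))
    (pvScoreB ["security", "cybersecurity", "information security", "security engineer"] (PySem.Str.lower job_desc))
    (pvScoreB_nonneg _ _)
  unfold Spec_extract_job_domain extract_job_domain extract_job_domain_alt
  simp only [pvTECH_DOMAINS, List.foldl, pvScore_eq]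
  simp only [pvStep, List.foldl] at key
  simp [PySem.Dict.insert, PySem.Dict.empty, PySem.Dict.contains,
    PySem.Dict.values, PySem.List.max?_id_cons] at key ⊢
  exact key
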